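-- pv_equiv track=rewrite | github.com/AmirAhanii/Consensia | DS/3_export_all_labels.py | compute_line_consensus
-- ===== SOURCE A (Python) =====
-- from collections import Counter, defaultdict
-- from typing import Dict, List, Any, Tuple
--
-- def compute_line_consensus(votes: Dict[int, Counter], threshold: int = 3) -> Dict[int, str]:
--     out: Dict[int, str] = {}
--     for li, c in votes.items():
--         ok = [(lab, cnt) for lab, cnt in c.items() if cnt >= threshold]
--         if not ok:
--             continue
--         ok.sort(key=lambda x: (-x[1], x[0]))
--         out[li] = ok[0][0]
--     return out
-- ===== SOURCE B (Python) =====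
-- def compute_line_consensus(votes, threshold=3):
--     out = {}
--     for li, c in votes.items():
--         best = None  # running (label, count) among qualifying entries
--         for lab, cnt in c.items():
--             if cnt >= threshold and (best is None or cnt > best[1] or (cnt == best[1] and lab < best[0])):
--                 best = (lab, cnt)
--         if best is not None:
--             out[li] = best[0]
--     return out
-- ===== Notes on version B (the rewrite author's own statement) =====
-- stated objective: simpler
-- what changed: Per line, B replaces A's build-filtered-list-then-sort-by-(-count,label)-and-take-head with a single running-best scan over the counter items (strictly better = higher count, or equal count and smaller label), assigning only when some label met the threshold.
import Mathlib
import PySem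

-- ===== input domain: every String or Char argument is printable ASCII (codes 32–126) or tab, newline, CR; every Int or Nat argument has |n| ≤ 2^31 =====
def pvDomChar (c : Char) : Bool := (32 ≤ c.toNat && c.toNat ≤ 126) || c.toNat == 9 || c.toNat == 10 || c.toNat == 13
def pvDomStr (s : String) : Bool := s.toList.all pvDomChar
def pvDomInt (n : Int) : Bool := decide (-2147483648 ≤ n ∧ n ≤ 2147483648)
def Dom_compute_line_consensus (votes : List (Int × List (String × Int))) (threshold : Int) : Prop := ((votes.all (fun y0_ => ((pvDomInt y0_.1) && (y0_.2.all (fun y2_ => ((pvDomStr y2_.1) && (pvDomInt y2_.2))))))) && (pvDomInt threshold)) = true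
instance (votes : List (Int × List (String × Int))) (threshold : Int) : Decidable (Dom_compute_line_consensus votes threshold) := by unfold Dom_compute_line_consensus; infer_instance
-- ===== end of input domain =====

-- B replaces A's filter-then-sort of each line's label counts by a single running-best
-- scan (count-descending, then label-ascending); objective: simpler (one linear pass, no sort).

-- ===== PORT A =====
-- ok = [(lab, cnt) for lab, cnt in c.items() if cnt >= threshold]
def pvOkFilter (c : List (String × Int)) (threshold : Int) : List (String × Int) :=
  c.filter (fun x => decide (threshold ≤ x.2))

def compute_line_consensus (votes : List (Int × List (String × Int))) (threshold : Int) : List (Int × String) :=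
  (votes.foldl (fun (out : PySem.Dict Int String) (p : Int × List (String × Int)) =>
      let ok := pvOkFilter p.2 threshold
      if ok = [] then out
      else
        -- ok.sort(key=lambda x: (-x[1], x[0])); out[li] = ok[0][0]  (ok is nonempty here)
        out.insert p.1 ((PySem.List.sorted2 ok (fun x => -x.2) (fun x => x.1) false).headD ("", 0)).1)
    PySem.Dict.empty).items

-- ===== PORT B =====
-- best is None or cnt > best[1] or (cnt == best[1] and lab < best[0])
def pvBetter (best : Option (String × Int)) (lab : String) (cnt : Int) : Bool :=
  match best with
  | none => true
  | some b => decide (b.2 < cnt) || (decide (cnt = b.2) && decide (lab < b.1))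

def pvBestStep (threshold : Int) (best : Option (String × Int)) (x : String × Int) : Option (String × Int) :=
  if decide (threshold ≤ x.2) && pvBetter best x.1 x.2 then some x else best

def compute_line_consensus_alt (votes : List (Int × List (String × Int))) (threshold : Int) : List (Int × String) :=
  (votes.foldl (fun (out : PySem.Dict Int String) (p : Int × List (String × Int)) =>
      match p.2.foldl (pvBestStep threshold) none with
      | none => out
      | some b => out.insert p.1 b.1)
    PySem.Dict.empty).items

-- ===== PRECONDITION & SPEC =====
def Spec_compute_line_consensus (votes : List (Int × List (String × Int))) (threshold : Int) (out : List (Int × String)) : Prop := out = compute_line_consensus_alt votes threshold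
instance (votes : List (Int × List (String × Int))) (threshold : Int) (out : List (Int × String)) : Decidable (Spec_compute_line_consensus votes threshold out) := by unfold Spec_compute_line_consensus; infer_instance

-- ===== CLAIM (what is proved, stated in full; the proofs are below) =====
def Claim_equal_compute_line_consensus : Prop := ∀ (votes : List (Int × List (String × Int))) (threshold : Int), Dom_compute_line_consensus votes threshold → Spec_compute_line_consensus votes threshold (compute_line_consensus votes threshold)

-- ===== LEMMAS AND PROOFS =====

-- A's sort comparator, as PySem.List.sorted2 unfolds it for key (-cnt, lab)
def pvLt (a b : String × Int) : Bool :=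
  decide ((-a.2 : Int) < -b.2) || (!decide ((-b.2 : Int) < -a.2) && decide (a.1 < b.1))

-- "replace the running value when the new element sorts strictly before it"
def pvStep {α : Type} (before : α → α → Bool) (o : Option α) (x : α) : Option α :=
  match o with
  | none => some x
  | some h => if before x h then some x else o

theorem pv_head?_insertBy {α : Type} (before : α → α → Bool) (x : α) (acc : List α) :
    (PySem.List.insertBy before x acc).head? = pvStep before acc.head? x := by
  cases acc with
  | nil => rfl
  | cons h t =>
    show (if before x h then x :: h :: t else h :: PySem.List.insertBy before x t).head? = _
    by_cases hb : before x h = true <;> simp [hb, pvStep]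

theorem pv_head?_foldl_insertBy {α : Type} (before : α → α → Bool) :
    ∀ (ys acc : List α),
      (ys.foldl (fun acc x => PySem.List.insertBy before x acc) acc).head?
        = ys.foldl (pvStep before) acc.head? := by
  intro ys
  induction ys with
  | nil => intro acc; rfl
  | cons y t ih =>
    intro acc
    rw [List.foldl_cons, List.foldl_cons, ih, pv_head?_insertBy]

theorem pv_isSome_foldl_pvStep {α : Type} (before : α → α → Bool) :
    ∀ (ys : List α) (b : α), (ys.foldl (pvStep before) (some b)).isSome := by
  intro ys
  induction ys with
  | nil => intro b; rfl
  | cons y t ih =>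
    intro b
    rw [List.foldl_cons]
    show (t.foldl (pvStep before) (if before y b then some y else some b)).isSome
    by_cases hb : before y b = true <;> simp [hb, ih]

theorem pv_foldl_bestStep_eq (c : List (String × Int)) (threshold : Int) :
    c.foldl (pvBestStep threshold) none = (pvOkFilter c threshold).foldl (pvStep pvLt) none := by
  rw [pvOkFilter, List.foldl_filter]
  congr 1
  funext o x
  cases o with
  | none =>
    by_cases ht : threshold ≤ x.2 <;> simp [pvBestStep, pvBetter, pvStep, ht]
  | some b =>
    have hlt : pvLt x b = pvBetter (some b) x.1 x.2 := by
      rw [pvLt, pvBetter]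
      rcases x with ⟨xl, xc⟩; rcases b with ⟨bl, bc⟩
      apply Bool.eq_iff_iff.mpr
      simp only [Bool.or_eq_true, Bool.and_eq_true, Bool.not_eq_true', decide_eq_true_eq,
        decide_eq_false_iff_not]
      constructor
      · rintro (h | ⟨h1, h2⟩)
        · left; omega
        · by_cases hc : bc < xc
          · left; exact hc
          · right; exact ⟨by omega, h2⟩
      · rintro (h | ⟨h1, h2⟩)
        · left; omega
        · right; exact ⟨by omega, h2⟩
    by_cases ht : threshold ≤ x.2 <;>
      by_cases hb : pvBetter (some b) x.1 x.2 = true <;>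
        simp [pvBestStep, pvStep, ht, hb, hlt]

theorem pv_line_eq (threshold : Int) (out : PySem.Dict Int String) (p : Int × List (String × Int)) :
    (if pvOkFilter p.2 threshold = [] then out
     else out.insert p.1
       ((PySem.List.sorted2 (pvOkFilter p.2 threshold) (fun x => -x.2) (fun x => x.1) false).headD ("", 0)).1)
    = (match p.2.foldl (pvBestStep threshold) none with
       | none => out
       | some b => out.insert p.1 b.1) := by
  have hfold := pv_foldl_bestStep_eq p.2 threshold
  by_cases hne : pvOkFilter p.2 threshold = []
  · rw [hne] at hfold
    simp [hne, hfold]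
  · have hhead : (PySem.List.sorted2 (pvOkFilter p.2 threshold) (fun x => -x.2) (fun x => x.1) false).head?
        = (pvOkFilter p.2 threshold).foldl (pvStep pvLt) none := by
      rw [show PySem.List.sorted2 (pvOkFilter p.2 threshold) (fun x => -x.2) (fun x => x.1) false
            = (pvOkFilter p.2 threshold).foldl (fun acc x => PySem.List.insertBy pvLt x acc) [] from rfl,
         pv_head?_foldl_insertBy]
      rfl
    obtain ⟨x, t, hok⟩ := List.exists_cons_of_ne_nil hne
    have hsome : ((pvOkFilter p.2 threshold).foldl (pvStep pvLt) none).isSome := by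
      rw [hok, List.foldl_cons]
      exact pv_isSome_foldl_pvStep pvLt t x
    rcases Option.isSome_iff_exists.mp hsome with ⟨b, hb⟩
    rw [hfold, hb, if_neg hne, List.headD_eq_head?_getD, hhead, hb]
    rfl

theorem compute_line_consensus_eq (votes : List (Int × List (String × Int))) (threshold : Int) :
    compute_line_consensus votes threshold = compute_line_consensus_alt votes threshold := by
  unfold compute_line_consensus compute_line_consensus_alt
  congr 2
  funext out p
  exact pv_line_eq threshold out p

-- ===== VERDICT (by name: the statement is the Claim_ definition above) =====
theorem compute_line_consensus_spec : Claim_equal_compute_line_consensus := by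
  intro votes threshold _
  unfold Spec_compute_line_consensus
  exact compute_line_consensus_eq votes threshold
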